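-- pv_equiv track=rewrite | github.com/Asharma538/neetcode-submissions | Data Structures & Algorithms/longest-repeating-substring-with-replacement/submission-1.py | calc
-- ===== SOURCE A (Python) =====
-- from collections import deque
--
-- def calc(ch, s, k):
--     # if k == 0:
--     #     j = 0
--     #     max_len = 0
--     #     while j<len(s):
--     #         tmp = 0
--     #         while j<len(s) and s[j] == ch:
--     #             j+=1
--     #             tmp+=1
--     #         max_len = max(max_len , tmp)
--     #         j+=1
--     #     return max_len
--     # else:
--     q = deque()
--     i = 0
--     max_len = 0
--     for j in range(len(s)):
--         if s[j] != ch: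
--             q.append(j)
--             if len(q) > k:
--                 i = q.popleft()+1
--         max_len = max(max_len , j - i + 1)
--     return max_len
-- ===== SOURCE B (Python) =====
-- def calc(ch, s, k):
--     # Staged formulation: record the mismatch positions once, then take a max of
--     # closed-form window lengths, one per "number of mismatches seen" t: the
--     # window ending just before the (t+1)-th mismatch (or at the end of s) and
--     # starting just after the mismatch that clamp(k, 0, t) replacements cannot cover.
--     pos = [j for j, c in enumerate(s) if c != ch]
--     n, m = len(s), len(pos)
--     best = 0
--     for t in range(m + 1):
--         end = pos[t] - 1 if t < m else n - 1
--         drop = t - max(0, min(k, t))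
--         left = pos[drop - 1] + 1 if drop > 0 else 0
--         if end - left + 1 > best:
--             best = end - left + 1
--     return best
-- ===== Notes on version B (the rewrite author's own statement) =====
-- stated objective: alternative
-- what changed: Replaced A's online sliding window (deque of mismatch indices maintained per character) by a staged computation: one pass records all mismatch positions, then the answer is a max of closed-form window lengths indexed by the number of mismatches seen, with the left edge computed by direct arithmetic indexing into the position list instead of any window state.
import Mathlib
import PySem

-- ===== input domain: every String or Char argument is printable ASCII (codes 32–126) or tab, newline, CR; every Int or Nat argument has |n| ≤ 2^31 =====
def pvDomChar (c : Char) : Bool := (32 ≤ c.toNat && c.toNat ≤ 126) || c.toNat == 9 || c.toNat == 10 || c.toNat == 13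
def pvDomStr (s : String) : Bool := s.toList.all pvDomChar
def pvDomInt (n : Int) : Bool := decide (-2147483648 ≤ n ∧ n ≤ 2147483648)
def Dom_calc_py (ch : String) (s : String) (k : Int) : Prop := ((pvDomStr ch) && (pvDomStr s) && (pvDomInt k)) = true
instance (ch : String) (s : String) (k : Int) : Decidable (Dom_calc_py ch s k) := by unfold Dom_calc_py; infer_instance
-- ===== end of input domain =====

-- B replaces A's online deque-maintained sliding window by a staged computation:
-- record the mismatch positions once, then maximise a closed-form window length per mismatch count.

-- ===== PORT A =====
-- s[j] (a 1-char string) compared with ch, as code-point lists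
def calc_atNe (ch : String) (s : String) (j : Int) : Bool :=
  decide ((PySem.Str.pyGet? s j).map (fun c => [c]) ≠ some ch.toList)

-- A's loop body: deque q of mismatch indices, left pointer i, running max.
def calc_stepA (ch : String) (s : String) (k : Int)
    (st : List Int × Int × Int) (j : Int) : List Int × Int × Int :=
  let q := st.1
  let i := st.2.1
  let m := st.2.2
  let qi :=
    if calc_atNe ch s j then
      let q1 := q ++ [j]                                        -- q.append(j)
      if (q1.length : Int) > k then (q1.tail, q1.headD 0 + 1)   -- i = q.popleft()+1
      else (q1, i)
    else (q, i)
  (qi.1, qi.2, max m (j - qi.2 + 1))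

def calc_py (ch : String) (s : String) (k : Int) : Int :=
  ((PySem.List.pyRange 0 (PySem.Str.len s) 1).foldl
      (calc_stepA ch s k) ([], 0, 0)).2.2

-- ===== PORT B =====
-- pos = [j for j, c in enumerate(s) if c != ch]
def calc_posB (ch : String) (s : String) : List Int :=
  ((PySem.List.enumerate s.toList 0).filter (fun p => decide ([p.2] ≠ ch.toList))).map (fun p => p.1)

-- B's loop body over t = number of mismatches used; pos[·] is always in range
-- where looked up, so pyGetD's default is never read.
def calc_stepB (n : Int) (pos : List Int) (k : Int) (best : Int) (t : Int) : Int :=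
  let m : Int := PySem.List.len pos
  let endv := if t < m then PySem.List.pyGetD pos t 0 - 1 else n - 1
  let drop := t - max 0 (min k t)
  let left := if drop > 0 then PySem.List.pyGetD pos (drop - 1) 0 + 1 else 0
  if endv - left + 1 > best then endv - left + 1 else best

def calc_py_alt (ch : String) (s : String) (k : Int) : Int :=
  let pos := calc_posB ch s
  (PySem.List.pyRange 0 (PySem.List.len pos + 1) 1).foldl
    (calc_stepB (PySem.Str.len s) pos k) 0

-- ===== PRECONDITION & SPEC =====
def Spec_calc_py (ch : String) (s : String) (k : Int) (out : Int) : Prop := out = calc_py_alt ch s k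
instance (ch : String) (s : String) (k : Int) (out : Int) : Decidable (Spec_calc_py ch s k out) := by unfold Spec_calc_py; infer_instance

-- ===== CLAIM (what is proved, stated in full; the proofs are below) =====
def Claim_equal_calc_py : Prop := ∀ (ch : String) (s : String) (k : Int), Dom_calc_py ch s k → Spec_calc_py ch s k (calc_py ch s k)

-- ===== LEMMAS AND PROOFS =====

-- mismatch positions among the first n indices
def pvP (ch : String) (s : String) (n : Nat) : List Nat :=
  (List.range n).filter (fun t => calc_atNe ch s (t : Int))

-- number of popped mismatches after n steps of A (= B's `drop` at t = |pvP n|)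
def pvDropN (ch : String) (s : String) (k : Int) (n : Nat) : Nat :=
  (pvP ch s n).length - min k.toNat (pvP ch s n).length

-- A's left pointer after n steps, in closed form
def pvL (ch : String) (s : String) (k : Int) (n : Nat) : Int :=
  if pvDropN ch s k n = 0 then 0
  else ((pvP ch s n).getD (pvDropN ch s k n - 1) 0 : Nat) + 1

-- A's running max after n steps
def pvF (ch : String) (s : String) (k : Int) : Nat → Int
  | 0 => 0
  | n + 1 => max (pvF ch s k n) ((n : Int) - pvL ch s k (n + 1) + 1)

-- B's fold restricted to the length-n prefix
def pvH (ch : String) (s : String) (k : Int) (n : Nat) : Int :=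
  (PySem.List.pyRange 0 (((pvP ch s n).length : Int) + 1) 1).foldl
    (calc_stepB (n : Int) ((pvP ch s n).map (fun t : Nat => (t : Int))) k) 0

lemma pvGetD_map_cast (P : List Nat) (i : Nat) :
    (P.map (fun t : Nat => (t : Int))).getD i 0 = ((P.getD i 0 : Nat) : Int) := by
  simp [List.getD, List.getElem?_map]
  cases P[i]? <;> simp

lemma pvP_succ (ch s : String) (n : Nat) :
    pvP ch s (n + 1) = if calc_atNe ch s (n : Int) then pvP ch s n ++ [n] else pvP ch s n := by
  simp [pvP, List.range_succ]
  split <;> simp [*]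

lemma pvA_inv (ch s : String) (k : Int) (n : Nat) :
    (PySem.List.pyRange 0 (n : Int) 1).foldl (calc_stepA ch s k) ([], 0, 0)
      = (((pvP ch s n).drop (pvDropN ch s k n)).map (fun t : Nat => (t : Int)),
         pvL ch s k n, pvF ch s k n) := by
  induction n with
  | zero =>
    rw [Nat.cast_zero, PySem.List.pyRange_one_eq_nil le_rfl]
    simp [pvP, pvDropN, pvL, pvF]
  | succ n ih =>
    rw [show ((n + 1 : Nat) : Int) = (n : Int) + 1 by push_cast; ring,
      PySem.List.pyRange_one_succ_right (by positivity), List.foldl_append, ih]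
    simp only [List.foldl_cons, List.foldl_nil]
    set P := pvP ch s n with hP
    set M := P.length with hM
    set d := pvDropN ch s k n with hd
    have hdM : d = M - min k.toNat M := rfl
    by_cases hne : calc_atNe ch s (n : Int) = true
    · have hP1 : pvP ch s (n + 1) = P ++ [n] := by rw [pvP_succ, if_pos hne]
      have hq1 : (P.drop d).map (fun t : Nat => (t : Int)) ++ [(n : Int)]
          = (((P ++ [n]).drop d).map (fun t : Nat => (t : Int))) := by
        rw [List.drop_append_of_le_length (by omega), List.map_append]
        rfl
      have hlen : ((P.drop d).map (fun t : Nat => (t : Int)) ++ [(n : Int)]).length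
          = M - d + 1 := by simp [hM]
      set d' := pvDropN ch s k (n + 1) with hd'
      have hd'eq : d' = (M + 1) - min k.toNat (M + 1) := by
        rw [hd', pvDropN, hP1]; simp [hM]
      rw [calc_stepA]
      simp only [hne, if_true, hlen]
      split_ifs with hC
      · -- pop
        have hpop : d' = d + 1 := by omega
        have hdlt : d < (P ++ [n]).length := by simp; omega
        have hi : ((P.drop d).map (fun t : Nat => (t : Int)) ++ [(n : Int)]).headD 0 + 1
            = pvL ch s k (n + 1) := by
          rw [hq1, pvL, ← hd', hpop, if_neg (Nat.succ_ne_zero d), hP1]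
          rw [List.headD_eq_head?_getD, List.head?_map, List.head?_drop,
            List.getElem?_eq_getElem hdlt]
          simp [List.getElem?_eq_getElem hdlt]
        dsimp only
        rw [hi, hq1, hP1, hpop, ← List.map_tail, List.tail_drop]
        have : pvF ch s k (n + 1) = max (pvF ch s k n) ((n : Int) - pvL ch s k (n + 1) + 1) := rfl
        rw [this]
      · -- no pop
        have hd0 : d' = d ∧ d = 0 := by omega
        dsimp only
        rw [hq1, hP1]
        have hL1 : pvL ch s k n = pvL ch s k (n + 1) := by
          rw [pvL, pvL, ← hd, ← hd', hd0.1, hd0.2, if_pos rfl, if_pos rfl]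
        rw [hd0.1, hd0.2, hL1]
        have : pvF ch s k (n + 1) = max (pvF ch s k n) ((n : Int) - pvL ch s k (n + 1) + 1) := rfl
        rw [this]
    · have hP1 : pvP ch s (n + 1) = P := by
        rw [pvP_succ, if_neg (by simpa using hne)]
      have hd1 : pvDropN ch s k (n + 1) = d := by rw [pvDropN, hP1]; omega
      have hL1 : pvL ch s k (n + 1) = pvL ch s k n := by
        rw [pvL, pvL, hd1, ← hd, hP1]
      rw [calc_stepA]
      simp only [hne, if_false, Bool.false_eq_true]
      rw [hP1, hd1, hL1]
      have : pvF ch s k (n + 1) = max (pvF ch s k n) ((n : Int) - pvL ch s k (n + 1) + 1) := rfl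
      rw [this, hL1]


lemma pvLeft_eq (P : List Nat) (k : Int) :
    (if ((P.length : Int) - max 0 (min k (P.length : Int))) > 0
     then PySem.List.pyGetD (P.map (fun t : Nat => (t : Int)))
        ((((P.length : Int) - max 0 (min k (P.length : Int)))) - 1) 0 + 1 else 0)
    = (if P.length - min k.toNat P.length = 0 then 0
       else ((P.getD (P.length - min k.toNat P.length - 1) 0 : Nat) : Int) + 1) := by
  have hdc : (P.length : Int) - max 0 (min k (P.length : Int))
      = ((P.length - min k.toNat P.length : Nat) : Int) := by omega
  rw [hdc]
  split_ifs with h1 h2 h2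
  · exfalso; omega
  · rw [show ((P.length - min k.toNat P.length : Nat) : Int) - 1
        = ((P.length - min k.toNat P.length - 1 : Nat) : Int) by omega]
    rw [PySem.List.pyGetD_natCast]
    rw [pvGetD_map_cast]
  · rfl
  · exfalso; omega

lemma pvGetD_append (pos : List Int) (x t : Int) (h0 : 0 ≤ t) (h : t < (pos.length : Int)) :
    PySem.List.pyGetD (pos ++ [x]) t 0 = PySem.List.pyGetD pos t 0 := by
  rw [PySem.List.pyGetD_of_nonneg _ _ h0, PySem.List.pyGetD_of_nonneg _ _ h0,
    List.getD_append _ _ _ _ (by omega)]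

lemma pvGetD_last (pos : List Int) (x : Int) :
    PySem.List.pyGetD (pos ++ [x]) ((pos.length : Nat) : Int) 0 = x := by
  rw [PySem.List.pyGetD_natCast]
  simp [List.getD]

lemma pvFH (ch s : String) (k : Int) (n : Nat) : pvF ch s k n = pvH ch s k n := by
  induction n with
  | zero =>
    have h0 : pvP ch s 0 = [] := by simp [pvP]
    rw [pvF, pvH, h0]
    rw [show (([] : List Nat).length : Int) + 1 = 0 + 1 by simp]
    rw [PySem.List.pyRange_one_singleton]
    simp [calc_stepB, PySem.List.len_eq]
  | succ n ih =>
    by_cases hne : calc_atNe ch s (n : Int) = true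
    · have hP1 : pvP ch s (n + 1) = pvP ch s n ++ [n] := by rw [pvP_succ, if_pos hne]
      have hmap : (pvP ch s (n+1)).map (fun t : Nat => (t : Int))
          = (pvP ch s n).map (fun t : Nat => (t : Int)) ++ [(n : Int)] := by
        rw [hP1, List.map_append]; rfl
      have hlen1 : ((pvP ch s (n+1)).length : Int) = ((pvP ch s n).length : Int) + 1 := by
        rw [hP1]; simp
      have hlast : PySem.List.pyGetD
          ((pvP ch s n).map (fun t : Nat => (t : Int)) ++ [(n : Int)])
          (((pvP ch s n).length : Int)) 0 = (n : Int) := by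
        have := pvGetD_last ((pvP ch s n).map (fun t : Nat => (t : Int))) (n : Int)
        simp only [List.length_map] at this
        exact this
      have hsplit : PySem.List.pyRange 0 ((((pvP ch s n).length : Int) + 1) + 1) 1
          = PySem.List.pyRange 0 (((pvP ch s n).length : Int) + 1) 1
            ++ [((pvP ch s n).length : Int) + 1] := by
        exact PySem.List.pyRange_one_succ_right (by positivity)
      have hcongr : ∀ (acc : Int), ∀ t ∈ PySem.List.pyRange 0 (((pvP ch s n).length : Int) + 1) 1,
          calc_stepB ((n + 1 : Nat) : Int)
              ((pvP ch s n).map (fun t : Nat => (t : Int)) ++ [(n : Int)]) k acc t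
            = calc_stepB (n : Int) ((pvP ch s n).map (fun t : Nat => (t : Int))) k acc t := by
        intro acc t ht
        rw [PySem.List.mem_pyRange_one] at ht
        have hm' : t < ((((pvP ch s n).map (fun t : Nat => (t : Int)) ++ [(n : Int)])).length : Int) := by
          simp; omega
        have hdropLe : t - max 0 (min k t) ≤ t := by omega
        have hleft : (if t - max 0 (min k t) > 0
            then PySem.List.pyGetD ((pvP ch s n).map (fun t : Nat => (t : Int)) ++ [(n : Int)])
              (t - max 0 (min k t) - 1) 0 + 1 else 0)
            = (if t - max 0 (min k t) > 0
            then PySem.List.pyGetD ((pvP ch s n).map (fun t : Nat => (t : Int)))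
              (t - max 0 (min k t) - 1) 0 + 1 else 0) := by
          split_ifs with hdp
          · rw [pvGetD_append _ _ _ (by omega) (by simp; omega)]
          · rfl
        by_cases htM : t < ((pvP ch s n).length : Int)
        · simp only [calc_stepB, PySem.List.len_eq, if_pos hm', if_pos htM,
            List.length_map, hleft]
          rw [pvGetD_append _ _ _ (by omega) (by simp; omega)]
        · have hteq : t = ((pvP ch s n).length : Int) := by omega
          subst hteq
          have h1 : ((pvP ch s n).length : Int)
              < (((pvP ch s n).map (fun t : Nat => (t : Int)) ++ [(n : Int)]).length : Int) := by
            simp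
          have h2 : ¬ ((pvP ch s n).length : Int)
              < (((pvP ch s n).map (fun t : Nat => (t : Int))).length : Int) := by simp
          simp only [calc_stepB, PySem.List.len_eq, if_pos h1, if_neg h2, hleft, hlast]
      rw [pvF, pvH, hmap, hlen1, hsplit, List.foldl_append,
        PySem.List.foldl_congr_mem _ _ _ _ hcongr]
      rw [pvH] at ih
      simp only [List.foldl_cons, List.foldl_nil]
      rw [← ih]
      have hL : pvL ch s k (n + 1)
          = (if (((pvP ch s (n+1)).length : Int) - max 0 (min k ((pvP ch s (n+1)).length : Int))) > 0
             then PySem.List.pyGetD ((pvP ch s (n+1)).map (fun t : Nat => (t : Int)))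
                (((((pvP ch s (n+1)).length : Int) - max 0 (min k ((pvP ch s (n+1)).length : Int)))) - 1) 0 + 1 else 0) := by
        rw [pvLeft_eq]; rw [pvL, pvDropN]
      rw [hL, hmap, hlen1]
      simp only [calc_stepB, PySem.List.len_eq, List.length_map, List.length_append,
        List.length_cons, List.length_nil]
      push_cast
      split_ifs <;> omega
    · have hP1 : pvP ch s (n + 1) = pvP ch s n := by
        rw [pvP_succ, if_neg (by simpa using hne)]
      have hL1 : pvL ch s k (n + 1) = pvL ch s k n := by
        rw [pvL, pvL, pvDropN, pvDropN, hP1]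
      have hsplit : PySem.List.pyRange 0 (((pvP ch s n).length : Int) + 1) 1
          = PySem.List.pyRange 0 ((pvP ch s n).length : Int) 1 ++ [((pvP ch s n).length : Int)] := by
        exact PySem.List.pyRange_one_succ_right (by positivity)
      have hcongr : ∀ (acc : Int), ∀ t ∈ PySem.List.pyRange 0 ((pvP ch s n).length : Int) 1,
          calc_stepB ((n + 1 : Nat) : Int) ((pvP ch s n).map (fun t : Nat => (t : Int))) k acc t
            = calc_stepB (n : Int) ((pvP ch s n).map (fun t : Nat => (t : Int))) k acc t := by
        intro acc t ht
        rw [PySem.List.mem_pyRange_one] at ht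
        have htM : t < (((pvP ch s n).map (fun t : Nat => (t : Int))).length : Int) := by
          simp; omega
        simp only [calc_stepB, PySem.List.len_eq, if_pos htM]
      rw [pvF, pvH, hP1, hsplit, List.foldl_append,
        PySem.List.foldl_congr_mem _ _ _ _ hcongr]
      rw [pvH, hsplit, List.foldl_append] at ih
      simp only [List.foldl_cons, List.foldl_nil] at ih ⊢
      have hL : pvL ch s k n
          = (if (((pvP ch s n).length : Int) - max 0 (min k ((pvP ch s n).length : Int))) > 0
             then PySem.List.pyGetD ((pvP ch s n).map (fun t : Nat => (t : Int)))
                (((((pvP ch s n).length : Int) - max 0 (min k ((pvP ch s n).length : Int)))) - 1) 0 + 1 else 0) := by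
        rw [pvLeft_eq]; rw [pvL, pvDropN]
      simp only [calc_stepB, PySem.List.len_eq, List.length_map, lt_self_iff_false, if_false] at ih ⊢
      rw [hL1, hL, ih]
      push_cast
      split_ifs <;> omega


lemma pvPos_eq (ch s : String) :
    calc_posB ch s = (pvP ch s s.toList.length).map (fun t : Nat => (t : Int)) := by
  rw [calc_posB, PySem.List.enumerate_eq_map_pyRange s.toList 'a', PySem.List.len_eq,
    PySem.List.pyRange_zero_natCast, List.map_map, List.filter_map, List.map_map, pvP]
  have hfun : ∀ t ∈ List.range s.toList.length,
      ((fun p : Int × Char => decide ([p.2] ≠ ch.toList)) ∘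
        (fun j => (j, PySem.List.pyGetD s.toList j 'a')) ∘ fun k : Nat => (k : Int)) t
        = calc_atNe ch s (t : Int) := by
    intro t ht
    simp only [List.mem_range] at ht
    simp only [Function.comp, calc_atNe, PySem.Str.pyGet?, PySem.Chars.pyGet?,
      PySem.List.pyGet?_natCast, PySem.List.pyGetD_natCast,
      List.getElem?_eq_getElem ht, List.getD_eq_getElem _ _ ht]
    simp
  rw [List.filter_congr hfun]
  simp [Function.comp]

-- ===== VERDICT (by name: the statement is the Claim_ definition above) =====
theorem calc_py_spec : Claim_equal_calc_py := by
  intro ch s k _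
  unfold Spec_calc_py calc_py calc_py_alt
  rw [PySem.Str.len_eq, pvA_inv, pvFH, pvPos_eq, pvH]
  simp [PySem.List.len_eq]
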